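-- pv_equiv track=rewrite | github.com/MapoxeO/cnn | src/shell.py | _parse_cmd_input
-- ===== SOURCE A (Python) =====
-- def _parse_cmd_input(line):
-- 	"""
-- 	Парсит строчку команды.
-- 	:param line:
-- 	:return: кортеж (командлет, аргументы, ключи)
-- 	"""
-- 	cmd_name, *raw_args = line.split()
-- 	is_key_list = list(map(lambda x: x.startswith('-'), raw_args))
-- 	if True not in is_key_list:
-- 		return cmd_name, raw_args, {}
--
-- 	first_key_index = is_key_list.index(True)
--
-- 	args = raw_args[:first_key_index]
-- 	raw_kwargs = raw_args[first_key_index:]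
-- 	kwargs = {}
--
-- 	i = 0
-- 	while i < len(raw_kwargs):
-- 		if raw_kwargs[i].startswith('-'):
-- 			# если следующий аргумент есть и не начинается с '-', значит это значение
-- 			if i + 1 < len(raw_kwargs) and not raw_kwargs[i + 1].startswith('-'):
-- 				kwargs[raw_kwargs[i]] = raw_kwargs[i + 1]
-- 				i += 2
-- 			else:
-- 				kwargs[raw_kwargs[i]] = None
-- 				i += 1
-- 		else:
-- 			i += 1  # пропускаем неключевые слова (например, model, train)
-- 	return cmd_name, args, kwargs
-- ===== SOURCE B (Python) =====
-- def _parse_cmd_input(line):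
-- 	"""Single fused pass: no is_key_list, no .index, no slicing."""
-- 	cmd_name, *raw_args = line.split()
-- 	args = []
-- 	kwargs = {}
-- 	seen_key = False
-- 	toks = raw_args
-- 	while toks:
-- 		tok, *rest = toks
-- 		if tok.startswith('-'):
-- 			seen_key = True
-- 			if rest and not rest[0].startswith('-'):
-- 				kwargs[tok] = rest[0]
-- 				toks = rest[1:]
-- 			else:
-- 				kwargs[tok] = None
-- 				toks = rest
-- 		else:
-- 			if not seen_key:
-- 				args.append(tok)
-- 			toks = rest
-- 	return cmd_name, args, kwargs
-- ===== Notes on version B (the rewrite author's own statement) =====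
-- stated objective: simpler
-- what changed: Replaces the three-phase scheme (build is_key_list, find first key with .index, slice into args/raw_kwargs, then an index while-loop) with one fused pass over the tokens that collects args until the first key and builds kwargs with the same lookahead afterwards.
import Mathlib
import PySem

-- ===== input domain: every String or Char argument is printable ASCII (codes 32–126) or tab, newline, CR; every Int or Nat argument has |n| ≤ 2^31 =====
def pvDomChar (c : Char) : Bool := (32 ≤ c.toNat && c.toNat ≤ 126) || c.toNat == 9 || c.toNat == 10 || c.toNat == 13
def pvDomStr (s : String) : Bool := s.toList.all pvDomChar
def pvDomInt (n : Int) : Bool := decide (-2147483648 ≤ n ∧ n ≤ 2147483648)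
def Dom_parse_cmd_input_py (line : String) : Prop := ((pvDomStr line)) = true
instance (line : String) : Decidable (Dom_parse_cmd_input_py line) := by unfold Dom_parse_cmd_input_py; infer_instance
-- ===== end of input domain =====

-- B replaces A's three phases (key mask + .index + two slices + index while-loop) with one fused pass; objective: simpler.

-- ===== PORT A =====
-- A's while-loop over raw_kwargs with index i (advances by 1 or 2); kwargs is a PySem.Dict
def pvAKwLoop (ts : List String) (i : Nat) (kw : PySem.Dict String (Option String)) :
    PySem.Dict String (Option String) :=
  if _h : i < ts.length then
    if PySem.Str.startswith (ts.getD i "") "-" then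
      if i + 1 < ts.length ∧ ¬ (PySem.Str.startswith (ts.getD (i + 1) "") "-" = true) then
        pvAKwLoop ts (i + 2) (kw.insert (ts.getD i "") (some (ts.getD (i + 1) "")))
      else
        pvAKwLoop ts (i + 1) (kw.insert (ts.getD i "") none)
    else
      pvAKwLoop ts (i + 1) kw
  else kw
termination_by ts.length - i

def parse_cmd_input_py (line : String) : String × List String × (List (String × Option String)) :=
  match PySem.Str.split₀ line with
  | [] => ("", [], [])
  | cmd :: raw_args =>
    let is_key_list := raw_args.map (fun x => PySem.Str.startswith x "-")
    if ¬ (is_key_list.contains true = true) then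
      (cmd, raw_args, [])
    else
      let fk := (PySem.List.index? is_key_list true).getD 0
      let args := PySem.List.slice raw_args none (some (fk : Int))
      let raw_kwargs := PySem.List.slice raw_args (some (fk : Int)) none
      (cmd, args, (pvAKwLoop raw_kwargs 0 PySem.Dict.empty).items)

-- ===== PORT B =====
-- Source B's fused while-loop: toks shrinks by one or two tokens per step
def pvBLoop (toks : List String) (seen : Bool) (args : List String)
    (kw : PySem.Dict String (Option String)) :
    List String × PySem.Dict String (Option String) :=
  match toks with
  | [] => (args, kw)
  | tok :: rest =>
    if PySem.Str.startswith tok "-" then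
      match _hr : rest with
      | v :: rest' =>
        if ¬ (PySem.Str.startswith v "-" = true) then
          pvBLoop rest' true args (kw.insert tok (some v))
        else
          pvBLoop rest true args (kw.insert tok none)
      | [] => pvBLoop [] true args (kw.insert tok none)
    else
      pvBLoop rest seen (if seen then args else args ++ [tok]) kw
termination_by toks.length
decreasing_by all_goals (subst_vars; simp; try omega)

def parse_cmd_input_py_alt (line : String) : String × List String × (List (String × Option String)) :=
  match PySem.Str.split₀ line with
  | [] => ("", [], [])
  | cmd :: raw_args =>
    let p := pvBLoop raw_args false [] PySem.Dict.empty
    (cmd, p.1, p.2.items)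

-- ===== PRECONDITION & SPEC =====
-- A raises ValueError on a whitespace-only line (unpacking an empty split); B raises there identically.
def Pre_parse_cmd_input_py (line : String) : Prop := PySem.Str.split₀ line ≠ []
instance (line : String) : Decidable (Pre_parse_cmd_input_py line) := by
  unfold Pre_parse_cmd_input_py; infer_instance
def pvWitness_parse_cmd_input_py : String := "train model -k v"

def Spec_parse_cmd_input_py (line : String) (out : String × List String × (List (String × Option String))) : Prop := out = parse_cmd_input_py_alt line
instance (line : String) (out : String × List String × (List (String × Option String))) : Decidable (Spec_parse_cmd_input_py line out) := by unfold Spec_parse_cmd_input_py; infer_instance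

-- ===== CLAIM (what is proved, stated in full; the proofs are below) =====
def Claim_equal_parse_cmd_input_py : Prop := ∀ (line : String), Dom_parse_cmd_input_py line → Pre_parse_cmd_input_py line → Spec_parse_cmd_input_py line (parse_cmd_input_py line)

-- ===== LEMMAS AND PROOFS =====

-- B's args component: the tokens before the first key are appended while seen = false
theorem pvBLoop_fst (toks : List String) (seen : Bool) (args : List String)
    (kw : PySem.Dict String (Option String)) :
    (pvBLoop toks seen args kw).1 =
      if seen then args
      else args ++ toks.takeWhile (fun t => !PySem.Str.startswith t "-") := by
  fun_induction pvBLoop toks seen args kw <;> simp_all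

theorem pvBLoop_prefix (pre toks : List String) (args : List String)
    (kw : PySem.Dict String (Option String))
    (h : ∀ t ∈ pre, ¬ (PySem.Str.startswith t "-" = true)) :
    pvBLoop (pre ++ toks) false args kw = pvBLoop toks false (args ++ pre) kw := by
  induction pre generalizing args with
  | nil => simp
  | cons t l ih =>
    have ht := h t (by simp)
    simp only [Bool.not_eq_true] at ht
    rw [List.cons_append, pvBLoop.eq_def]
    simp only [PySem.Str.startswith_eq] at ht ⊢
    rw [ht]
    simp only [Bool.false_eq_true, if_false]
    rw [ih (args ++ [t]) (fun x hx => h x (by simp [hx]))]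
    simp

theorem pvBLoop_seen_irrel (t : String) (rest : List String) (args : List String)
    (kw : PySem.Dict String (Option String)) (h : PySem.Str.startswith t "-" = true) :
    pvBLoop (t :: rest) false args kw = pvBLoop (t :: rest) true args kw := by
  have h' : PySem.Chars.startswith t.toList ['-'] = true := by simpa using h
  cases rest <;> rw [pvBLoop.eq_def, pvBLoop.eq_def] <;> simp [h']

-- A's index loop computes exactly the dict component of B's loop on the remaining tokens
theorem pvAKwLoop_eq (ts : List String) (i : Nat) (kw : PySem.Dict String (Option String))
    (args : List String) :
    pvAKwLoop ts i kw = (pvBLoop (ts.drop i) true args kw).2 := by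
  fun_induction pvAKwLoop ts i kw with
  | case1 i kw hlt hkey hval ih =>
    -- consume two
    have h1 : i + 1 < ts.length := hval.1
    have e0 : ts[i]? = some ts[i] := List.getElem?_eq_getElem hlt
    have e1 : ts[i + 1]? = some ts[i + 1] := List.getElem?_eq_getElem h1
    rw [List.drop_eq_getElem_cons hlt, List.drop_eq_getElem_cons h1, pvBLoop]
    have hk : PySem.Chars.startswith (ts[i]).toList ['-'] = true := by
      simpa [List.getD_eq_getElem?_getD, e0] using hkey
    have hv : PySem.Chars.startswith (ts[i + 1]).toList ['-'] = false := by
      simpa [List.getD_eq_getElem?_getD, e1] using hval.2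
    rw [ih]
    simp [hk, hv, List.getD_eq_getElem?_getD, e0, e1]
  | case2 i kw hlt hkey hval ih =>
    -- consume one (key without value)
    have e0 : ts[i]? = some ts[i] := List.getElem?_eq_getElem hlt
    have hk : PySem.Chars.startswith (ts[i]).toList ['-'] = true := by
      simpa [List.getD_eq_getElem?_getD, e0] using hkey
    rw [List.drop_eq_getElem_cons hlt]
    by_cases h1 : i + 1 < ts.length
    · have e1 : ts[i + 1]? = some ts[i + 1] := List.getElem?_eq_getElem h1
      have hv : PySem.Chars.startswith (ts[i + 1]).toList ['-'] = true := by
        rcases not_and_or.mp hval with h | h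
        · exact absurd h1 h
        · simpa [List.getD_eq_getElem?_getD, e1] using not_not.mp h
      rw [List.drop_eq_getElem_cons h1, pvBLoop]
      rw [ih]
      rw [List.drop_eq_getElem_cons h1]
      simp [hk, hv, List.getD_eq_getElem?_getD, e0]
    · have hd : ts.drop (i + 1) = [] := by
        rw [List.drop_eq_nil_iff]; omega
      rw [hd, pvBLoop]
      rw [ih, hd]
      simp [hk, List.getD_eq_getElem?_getD, e0, pvBLoop]
  | case3 i kw hlt hkey ih =>
    have e0 : ts[i]? = some ts[i] := List.getElem?_eq_getElem hlt
    have hk : PySem.Chars.startswith (ts[i]).toList ['-'] = false := by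
      simpa [List.getD_eq_getElem?_getD, e0] using hkey
    rw [ih, List.drop_eq_getElem_cons hlt]
    conv_rhs => rw [pvBLoop.eq_def]
    simp [hk]
  | case4 i kw hge =>
    have hd : ts.drop i = [] := by rw [List.drop_eq_nil_iff]; omega
    rw [hd, pvBLoop]

theorem main_eq (line : String) : parse_cmd_input_py line = parse_cmd_input_py_alt line := by
  unfold parse_cmd_input_py parse_cmd_input_py_alt
  cases hs : PySem.Str.split₀ line with
  | nil => rfl
  | cons cmd raw_args =>
    simp only []
    by_cases hc : (raw_args.map (fun x => PySem.Str.startswith x "-")).contains true = true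
    · -- some key exists
      simp only [hc, not_true, if_false]
      obtain ⟨fk, hfk⟩ : ∃ j, PySem.List.index? (raw_args.map (fun x => PySem.Str.startswith x "-")) true = some j := by
        rw [← Option.isSome_iff_exists, PySem.List.index?_isSome_iff]
        simpa using hc
      obtain ⟨preB, sufB, hsplit, hlen, hnotin⟩ := (PySem.List.index?_eq_some_iff _ _ _).mp hfk
      obtain ⟨pre, rest, hraw, hpre, hrest⟩ := List.map_eq_append_iff.mp hsplit
      obtain ⟨k, post, hrest2, hk, hpost⟩ := List.map_eq_cons_iff.mp hrest
      have hprelen : pre.length = fk := by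
        have := congrArg List.length hpre
        simpa [hlen] using this
      have hprekeys : ∀ t ∈ pre, ¬ (PySem.Str.startswith t "-" = true) := by
        intro t ht hstart
        exact hnotin (hpre ▸ List.mem_map.mpr ⟨t, ht, hstart⟩)
      subst hrest2
      rw [hraw] at hfk ⊢
      rw [hfk]
      simp only [Option.getD_some]
      rw [PySem.List.slice_to_natCast, PySem.List.slice_from_natCast]
      rw [List.take_left' hprelen, List.drop_left' hprelen]
      rw [pvBLoop_prefix pre (k :: post) [] PySem.Dict.empty hprekeys]
      rw [List.nil_append, pvBLoop_seen_irrel k post pre PySem.Dict.empty hk]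
      rw [pvAKwLoop_eq (k :: post) 0 PySem.Dict.empty pre]
      rw [List.drop_zero]
      rw [pvBLoop_fst (k :: post) true pre PySem.Dict.empty]
      simp
    · -- no key
      simp only [hc]
      have hall : ∀ t ∈ raw_args, ¬ (PySem.Str.startswith t "-" = true) := by
        intro t ht hstart
        apply hc
        simp only [List.contains_eq_any_beq, List.any_eq_true]
        exact ⟨true, List.mem_map.mpr ⟨t, ht, hstart⟩, rfl⟩
      have hb := pvBLoop_prefix raw_args [] [] PySem.Dict.empty hall
      simp only [List.append_nil, List.nil_append] at hb
      rw [hb]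
      simp [pvBLoop, PySem.Dict.empty]

-- ===== VERDICT (by name: the statement is the Claim_ definition above) =====
theorem parse_cmd_input_py_spec : Claim_equal_parse_cmd_input_py := by
  intro line _ _
  unfold Spec_parse_cmd_input_py
  exact main_eq line
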